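-- pv_equiv track=rewrite | github.com/yccs-26/algorithm | python/programmers/tutorial/odd_even.py | solution
-- ===== SOURCE A (Python) =====
-- def solution(n):
--     answer = 0
--
--     if(n % 2 == 0):
--         # 짝수인 모든 자연수 제곱의 합
--         for i in range (2, n, 2):
--             answer += i ** 2
--     else:
--         for i in range (1, n, 2):
--             answer += i
--     return answer
-- ===== SOURCE B (Python) =====
-- def solution(n):
--     if n % 2 == 0:
--         m = max((n - 2) // 2, 0)
--         return 2 * m * (m + 1) * (2 * m + 1) // 3
--     m = max((n - 1) // 2, 0)
--     return m * m
-- ===== Notes on version B (the rewrite author's own statement) =====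
-- stated objective: faster
-- what changed: Replaced the O(n) accumulation loops with closed-form series formulas (Faulhaber sum for even squares, m^2 for the first m odd numbers).
import Mathlib
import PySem

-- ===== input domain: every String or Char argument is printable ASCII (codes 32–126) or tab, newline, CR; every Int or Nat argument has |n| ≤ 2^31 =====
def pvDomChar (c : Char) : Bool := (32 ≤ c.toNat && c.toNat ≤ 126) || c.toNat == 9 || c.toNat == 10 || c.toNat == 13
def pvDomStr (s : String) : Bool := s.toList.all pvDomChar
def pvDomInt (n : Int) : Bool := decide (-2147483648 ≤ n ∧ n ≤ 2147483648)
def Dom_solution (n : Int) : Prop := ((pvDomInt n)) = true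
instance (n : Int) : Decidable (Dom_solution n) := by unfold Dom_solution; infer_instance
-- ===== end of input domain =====

-- B replaces A's O(n) accumulation loops with closed-form series formulas (objective: faster, asymptotic).

-- ===== PORT A =====
def solution (n : Int) : Int :=
  let answer : Int := 0
  if PySem.Int.mod n 2 = 0 then
    (PySem.List.pyRange 2 n 2).foldl (fun acc i => acc + i ^ 2) answer
  else
    (PySem.List.pyRange 1 n 2).foldl (fun acc i => acc + i) answer

-- ===== PORT B =====
def solution_alt (n : Int) : Int :=
  if PySem.Int.mod n 2 = 0 then
    let m := max (PySem.Int.floordiv (n - 2) 2) 0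
    PySem.Int.floordiv (2 * m * (m + 1) * (2 * m + 1)) 3
  else
    let m := max (PySem.Int.floordiv (n - 1) 2) 0
    m * m

-- ===== PRECONDITION & SPEC =====
def Spec_solution (n : Int) (out : Int) : Prop := out = solution_alt n
instance (n : Int) (out : Int) : Decidable (Spec_solution n out) := by unfold Spec_solution; infer_instance

-- ===== CLAIM (what is proved, stated in full; the proofs are below) =====
def Claim_equal_solution : Prop := ∀ (n : Int), Dom_solution n → Spec_solution n (solution n)

-- ===== LEMMAS AND PROOFS =====

theorem pv_foldl_add {α : Type} (f : α → Int) (l : List α) (c : Int) :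
    l.foldl (fun a i => a + f i) c = c + (l.map f).sum := by
  induction l generalizing c with
  | nil => simp
  | cons x xs ih => simp [ih, add_assoc]

theorem pv_sq_sum (M : Nat) :
    ((List.range M).map (fun k : Nat => (2 + 2 * (k : Int)) ^ 2)).sum * 3
      = 2 * (M : Int) * ((M : Int) + 1) * (2 * (M : Int) + 1) := by
  induction M with
  | zero => simp
  | succ m ih =>
      simp [List.range_succ]
      push_cast at ih
      nlinarith [ih]

theorem pv_odd_sum (M : Nat) :
    ((List.range M).map (fun k : Nat => 1 + 2 * (k : Int))).sum = (M : Int) * (M : Int) := by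
  induction M with
  | zero => simp
  | succ m ih =>
      simp only [List.range_succ, List.map_append, List.sum_append, List.map_cons,
        List.map_nil, List.sum_cons, List.sum_nil]
      push_cast
      push_cast at ih
      linarith [ih]

theorem pv_floordiv_three (s : Int) : PySem.Int.floordiv (s * 3) 3 = s := by
  rw [PySem.Int.floordiv_eq_ediv_of_pos (by norm_num)]
  exact Int.mul_ediv_cancel s (by norm_num)

-- ===== VERDICT (by name: the statement is the Claim_ definition above) =====
theorem solution_spec : Claim_equal_solution := by
  intro n _
  unfold Spec_solution solution solution_alt
  have hm2 : PySem.Int.mod n 2 = n % 2 := PySem.Int.mod_eq_emod_of_pos (by norm_num)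
  have hfd2 : ∀ a : Int, PySem.Int.floordiv a 2 = a / 2 := fun a =>
    PySem.Int.floordiv_eq_ediv_of_pos (by norm_num)
  split
  · -- even branch
    rw [PySem.List.pyRange_of_pos 2 n (by norm_num), List.foldl_map,
        pv_foldl_add (fun y : Nat => (2 + 2 * (y : Int)) ^ 2), zero_add]
    set M : Nat := (if 2 < n then ((n - 2 + 2 - 1) / 2).toNat else 0) with hM
    have hmm : max (PySem.Int.floordiv (n - 2) 2) 0 = (M : Int) := by
      rw [hfd2, hM]
      rename_i hmod
      rw [hm2] at hmod
      split <;> omega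
    simp only [hmm]
    rw [← pv_sq_sum M, pv_floordiv_three]
  · -- odd branch
    rw [PySem.List.pyRange_of_pos 1 n (by norm_num), List.foldl_map,
        pv_foldl_add (fun y : Nat => (1 + 2 * (y : Int))), zero_add]
    set M : Nat := (if 1 < n then ((n - 1 + 2 - 1) / 2).toNat else 0) with hM
    have hmm : max (PySem.Int.floordiv (n - 1) 2) 0 = (M : Int) := by
      rw [hfd2, hM]
      rename_i hmod
      rw [hm2] at hmod
      split <;> omega
    simp only [hmm]
    exact pv_odd_sum M
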